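-- pv_equiv track=rewrite | github.com/NVIDIA/NeMo | nemo/collections/nlp/data/language_modeling/megatron/t5_speechlm_indexed_dataset.py | _num_epochs
-- ===== SOURCE A (Python) =====
-- def _num_epochs(tokens_per_epoch, seq_length, num_samples, add_extra_token=1):
--     """Based on number of samples and sequence lenght, calculate how many
--     epochs will be needed."""
--     num_epochs = 0
--     total_tokens = 0
--     while True:
--         num_epochs += 1
--         total_tokens += tokens_per_epoch
--         # -1 is because we need to retrieve seq_length + 1 token each time
--         # but the last token will overlap with the first token of the next
--         # sample except for the last sample.
--         if ((total_tokens - add_extra_token) // seq_length) >= num_samples: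
--             return num_epochs
-- ===== SOURCE B (Python) =====
-- def _num_epochs(tokens_per_epoch, seq_length, num_samples, add_extra_token=1):
--     """Based on number of samples and sequence lenght, calculate how many
--     epochs will be needed."""
--     tokens_needed = num_samples * seq_length + add_extra_token
--     return max(1, -(-tokens_needed // tokens_per_epoch))
-- ===== Notes on version B (the rewrite author's own statement) =====
-- stated objective: faster
-- what changed: Replaced the epoch-by-epoch accumulation loop by the closed form max(1, ceil((num_samples*seq_length+add_extra_token)/tokens_per_epoch)); Pre_ restricts to the natural domain where tokens_per_epoch and seq_length have the same nonzero sign, excluding seq_length=0 (A raises ZeroDivisionError), inputs where A's loop diverges, and sign-mismatched inputs where A's return of 1 is an accident of the first iteration.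
-- outside the precondition, e.g. on _num_epochs(-10, 5, -3, 1): A returns 1, B returns 2; on _num_epochs(0, 5, -3, 1): A returns 1, B raises ZeroDivisionError; on _num_epochs(10, 0, 3, 1): A raises ZeroDivisionError, B returns 1
import Mathlib
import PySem

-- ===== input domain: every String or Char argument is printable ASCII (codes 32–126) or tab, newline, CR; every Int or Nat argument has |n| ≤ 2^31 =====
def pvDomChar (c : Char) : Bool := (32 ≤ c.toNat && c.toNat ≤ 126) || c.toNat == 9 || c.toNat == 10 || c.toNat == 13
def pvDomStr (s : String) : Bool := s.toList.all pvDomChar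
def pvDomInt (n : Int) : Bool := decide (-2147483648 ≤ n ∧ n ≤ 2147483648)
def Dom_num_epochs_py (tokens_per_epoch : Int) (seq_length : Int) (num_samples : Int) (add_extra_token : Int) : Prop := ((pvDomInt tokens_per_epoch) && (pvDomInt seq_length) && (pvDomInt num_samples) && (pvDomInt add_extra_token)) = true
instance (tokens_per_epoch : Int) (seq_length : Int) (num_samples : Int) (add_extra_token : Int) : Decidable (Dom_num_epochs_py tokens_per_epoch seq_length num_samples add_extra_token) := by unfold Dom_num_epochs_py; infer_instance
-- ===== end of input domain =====

-- B replaces A's epoch-counting loop by the closed form max(1, ceil(target/tokens_per_epoch)) (faster: O(1) vs O(answer)).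

-- ===== PORT A =====
-- A's `while True` loop, with a fuel bound large enough (2^63) that it is never
-- reached on inputs satisfying Pre_ (the proof shows the loop returns earlier).
def numEpochsLoopA (tokens_per_epoch seq_length num_samples add_extra_token : Int) :
    Nat → Int → Int → Int
  | 0, num_epochs, _ => num_epochs
  | fuel + 1, num_epochs, total_tokens =>
    let num_epochs' := num_epochs + 1
    let total_tokens' := total_tokens + tokens_per_epoch
    if num_samples ≤ PySem.Int.floordiv (total_tokens' - add_extra_token) seq_length then
      num_epochs'
    else
      numEpochsLoopA tokens_per_epoch seq_length num_samples add_extra_token fuel num_epochs' total_tokens'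

def num_epochs_py (tokens_per_epoch : Int) (seq_length : Int) (num_samples : Int) (add_extra_token : Int) : Int :=
  numEpochsLoopA tokens_per_epoch seq_length num_samples add_extra_token (2 ^ 63) 0 0

-- ===== PORT B =====
def num_epochs_py_alt (tokens_per_epoch : Int) (seq_length : Int) (num_samples : Int) (add_extra_token : Int) : Int :=
  let tokens_needed := num_samples * seq_length + add_extra_token
  max 1 (-(PySem.Int.floordiv (-tokens_needed) tokens_per_epoch))

-- ===== PRECONDITION & SPEC =====
-- Pre_ restricts to the natural domain where tokens_per_epoch and seq_length have the
-- same nonzero sign; it excludes seq_length = 0 (A raises ZeroDivisionError),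
-- sign-mismatched or zero tokens_per_epoch, where A diverges on most inputs and, when it
-- does return, its value 1 is an accident of the first iteration's negative-divisor floor.
def Pre_num_epochs_py (tokens_per_epoch : Int) (seq_length : Int) (num_samples : Int) (add_extra_token : Int) : Prop :=
  (0 < seq_length ∧ 0 < tokens_per_epoch) ∨ (seq_length < 0 ∧ tokens_per_epoch < 0)

instance (tokens_per_epoch : Int) (seq_length : Int) (num_samples : Int) (add_extra_token : Int) : Decidable (Pre_num_epochs_py tokens_per_epoch seq_length num_samples add_extra_token) := by unfold Pre_num_epochs_py; infer_instance

def pvWitness_num_epochs_py : Int × Int × Int × Int := (10, 5, 3, 1)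

def Spec_num_epochs_py (tokens_per_epoch : Int) (seq_length : Int) (num_samples : Int) (add_extra_token : Int) (out : Int) : Prop := out = num_epochs_py_alt tokens_per_epoch seq_length num_samples add_extra_token
instance (tokens_per_epoch : Int) (seq_length : Int) (num_samples : Int) (add_extra_token : Int) (out : Int) : Decidable (Spec_num_epochs_py tokens_per_epoch seq_length num_samples add_extra_token out) := by unfold Spec_num_epochs_py; infer_instance

-- ===== CLAIM (what is proved, stated in full; the proofs are below) =====
def Claim_equal_num_epochs_py : Prop := ∀ (tokens_per_epoch : Int) (seq_length : Int) (num_samples : Int) (add_extra_token : Int), Dom_num_epochs_py tokens_per_epoch seq_length num_samples add_extra_token → Pre_num_epochs_py tokens_per_epoch seq_length num_samples add_extra_token → Spec_num_epochs_py tokens_per_epoch seq_length num_samples add_extra_token (num_epochs_py tokens_per_epoch seq_length num_samples add_extra_token)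

-- ===== LEMMAS AND PROOFS =====

-- floordiv bracket for a NEGATIVE divisor: n ≤ x // s ↔ x ≤ n * s
theorem le_floordiv_iff_of_neg (x s n : Int) (hs : s < 0) :
    n ≤ PySem.Int.floordiv x s ↔ x ≤ n * s := by
  have hb := PySem.Int.mod_neg_bounds x hs
  have hq := PySem.Int.floordiv_mul_add_mod x s
  constructor
  · intro h
    nlinarith [mul_le_mul_of_nonpos_right h (le_of_lt hs)]
  · intro h
    by_contra hc
    push_neg at hc
    have h1 : PySem.Int.floordiv x s ≤ n - 1 := by omega
    nlinarith [mul_le_mul_of_nonpos_right h1 (le_of_lt hs)]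

-- the loop, started below a threshold m characterising A's exit condition, returns m
theorem loop_thresh (tokens_per_epoch seq_length num_samples add_extra_token m : Int)
    (hth : ∀ k : Int, (num_samples ≤ PySem.Int.floordiv (k * tokens_per_epoch - add_extra_token) seq_length ↔ m ≤ k)) :
    ∀ (fuel : Nat) (j : Int), j < m → m ≤ j + (fuel : Int) →
      numEpochsLoopA tokens_per_epoch seq_length num_samples add_extra_token fuel j (j * tokens_per_epoch) = m := by
  intro fuel
  induction fuel with
  | zero => intro j hj hf; simp at hf; omega
  | succ f ih =>
    intro j hj hf
    simp only [numEpochsLoopA]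
    have harg : j * tokens_per_epoch + tokens_per_epoch = (j + 1) * tokens_per_epoch := by ring
    rw [harg]
    by_cases hc : num_samples ≤ PySem.Int.floordiv ((j + 1) * tokens_per_epoch - add_extra_token) seq_length
    · rw [if_pos hc]
      have := (hth (j + 1)).mp hc
      omega
    · rw [if_neg hc]
      have h2 : ¬ m ≤ j + 1 := fun h => hc ((hth (j + 1)).mpr h)
      exact ih (j + 1) (by omega) (by push_cast at hf ⊢; omega)

-- unfolding a single loop step when the exit condition already holds
theorem loop_first (tokens_per_epoch seq_length num_samples add_extra_token : Int)
    (f : Nat) (j t : Int)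
    (h : num_samples ≤ PySem.Int.floordiv (t + tokens_per_epoch - add_extra_token) seq_length) :
    numEpochsLoopA tokens_per_epoch seq_length num_samples add_extra_token (f + 1) j t = j + 1 := by
  simp only [numEpochsLoopA]
  rw [if_pos h]

-- ===== VERDICT (by name: the statement is the Claim_ definition above) =====
theorem num_epochs_py_spec : Claim_equal_num_epochs_py := by
  intro tpe seq ns aet hDom hPre
  unfold Spec_num_epochs_py num_epochs_py num_epochs_py_alt
  set T : Int := ns * seq + aet with hT
  show numEpochsLoopA tpe seq ns aet (2 ^ 63) 0 0 = max 1 (-(PySem.Int.floordiv (-T) tpe))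
  unfold Dom_num_epochs_py pvDomInt at hDom
  simp only [Bool.and_eq_true, decide_eq_true_eq] at hDom
  obtain ⟨⟨⟨htpe, hseq⟩, hns⟩, haet⟩ := hDom
  set m : Int := -(PySem.Int.floordiv (-T) tpe) with hm
  -- threshold characterisation: A's exit condition holds at epoch k iff m ≤ k
  have hth : ∀ k : Int, (ns ≤ PySem.Int.floordiv (k * tpe - aet) seq ↔ m ≤ k) := by
    intro k
    have hmk : m ≤ k ↔ -k ≤ PySem.Int.floordiv (-T) tpe := by omega
    rcases hPre with ⟨hs, ht⟩ | ⟨hs, ht⟩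
    · rw [PySem.Int.le_floordiv_iff_mul_le hs, hmk, PySem.Int.le_floordiv_iff_mul_le ht]
      constructor <;> intro h <;> nlinarith
    · rw [le_floordiv_iff_of_neg _ _ _ hs, hmk, le_floordiv_iff_of_neg _ _ _ ht]
      constructor <;> intro h <;> nlinarith
  by_cases h1 : m ≤ 1
  · -- A exits at the first iteration; the closed form's max picks 1 too
    have hx : ns ≤ PySem.Int.floordiv (0 + tpe - aet) seq := by
      have := (hth 1).mpr h1
      rw [one_mul] at this
      rwa [zero_add]
    rw [(by norm_num : (2 ^ 63 : Nat) = 9223372036854775807 + 1),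
        loop_first tpe seq ns aet 9223372036854775807 0 0 hx]
    omega
  · push_neg at h1
    -- the loop runs to the threshold m; the max is m
    have hmfuel : m ≤ (2 ^ 63 : Int) := by
      rw [← hth (2 ^ 63)]
      have e1 : (0:Int) ≤ (2147483648 - ns) * (2147483648 - seq) := mul_nonneg (by omega) (by omega)
      have e2 : (0:Int) ≤ (ns + 2147483648) * (seq + 2147483648) := mul_nonneg (by omega) (by omega)
      have e3 : (0:Int) ≤ (2147483648 - ns) * (seq + 2147483648) := mul_nonneg (by omega) (by omega)
      have e4 : (0:Int) ≤ (ns + 2147483648) * (2147483648 - seq) := mul_nonneg (by omega) (by omega)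
      have hTb : -4611686018427387904 - 2147483648 ≤ T ∧ T ≤ 4611686018427387904 + 2147483648 := by
        constructor <;> nlinarith [e1, e2, e3, e4]
      rcases hPre with ⟨hs, ht⟩ | ⟨hs, ht⟩
      · rw [PySem.Int.le_floordiv_iff_mul_le hs]
        have h2 : (2 ^ 63 : Int) ≤ 2 ^ 63 * tpe := le_mul_of_one_le_right (by norm_num) (by omega)
        nlinarith [hTb.2]
      · rw [le_floordiv_iff_of_neg _ _ _ hs]
        have h2 : (2 ^ 63 : Int) * tpe ≤ 2 ^ 63 * (-1) :=
          mul_le_mul_of_nonneg_left (by omega) (by norm_num)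
        nlinarith [hTb.1]
    have hl := loop_thresh tpe seq ns aet m hth (2 ^ 63) 0 (by omega) (by push_cast; omega)
    rw [zero_mul] at hl
    rw [hl]
    omega
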